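-- pv_equiv track=rewrite | github.com/mohamedaziz-hachaichi/SMT | screens/find_shortest_path.py | get_total_production_time
-- ===== SOURCE A (Python) =====
-- def get_total_production_time(optimal_path, setup_times, production_times):
--     total_time = 0
--     for idx, product in enumerate(optimal_path):
--         # Calcul du temps de production pour chaque produit
--         production_time = production_times.get(product, 0)
--         total_time += production_time
--
--         # Ajout du temps de changeover pour chaque transition entre produits
--         if idx < len(optimal_path) - 1:
--             next_product = optimal_path[idx + 1]
--             changeover_time = setup_times.get((product, next_product), 0)
--             total_time += changeover_time
--
--     return total_time
-- ===== SOURCE B (Python) =====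
-- def get_total_production_time(optimal_path, setup_times, production_times):
--     prod_counts = {}
--     for p in optimal_path:
--         prod_counts[p] = prod_counts.get(p, 0) + 1
--     trans_counts = {}
--     for pair in zip(optimal_path, optimal_path[1:]):
--         trans_counts[pair] = trans_counts.get(pair, 0) + 1
--     total = 0
--     for product, t in production_times.items():
--         total += t * prod_counts.get(product, 0)
--     for pair, t in setup_times.items():
--         total += t * trans_counts.get(pair, 0)
--     return total
-- ===== Notes on version B (the rewrite author's own statement) =====
-- stated objective: alternative
-- what changed: B inverts the traversal: it first tallies the multiplicity of every product and of every adjacent transition of the path into frequency tables, then iterates each dict's entries once and adds entry time times the tallied multiplicity of its key, instead of walking the path and looking each element up.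
import Mathlib
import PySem

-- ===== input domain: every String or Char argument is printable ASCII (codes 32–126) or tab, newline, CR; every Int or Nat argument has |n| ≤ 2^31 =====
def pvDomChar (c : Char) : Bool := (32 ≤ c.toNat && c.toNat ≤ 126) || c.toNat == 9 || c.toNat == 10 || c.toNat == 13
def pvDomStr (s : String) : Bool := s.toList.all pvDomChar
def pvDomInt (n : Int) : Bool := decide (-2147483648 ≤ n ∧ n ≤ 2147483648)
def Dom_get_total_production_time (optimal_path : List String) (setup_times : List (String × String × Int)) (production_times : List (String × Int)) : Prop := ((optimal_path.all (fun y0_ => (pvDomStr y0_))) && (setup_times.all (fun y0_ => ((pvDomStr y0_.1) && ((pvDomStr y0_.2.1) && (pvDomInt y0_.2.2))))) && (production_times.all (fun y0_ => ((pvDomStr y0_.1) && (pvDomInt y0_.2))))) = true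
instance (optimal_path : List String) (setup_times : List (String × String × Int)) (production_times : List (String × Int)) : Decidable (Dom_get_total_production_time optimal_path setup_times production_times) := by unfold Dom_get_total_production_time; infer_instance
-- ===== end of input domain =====

-- B inverts the traversal: instead of walking the path and looking each element up in
-- the dicts, it iterates each dict's entries once and adds entry time × number of
-- occurrences of its key in the path / in the adjacent-pair list; objective: alternative.

-- ===== PORT A =====
-- loop body of A: state is total_time, one enumerate item (idx, product) at a time
def pvStepA (full : List String) (setup_times : List (String × String × Int)) (production_times : List (String × Int)) (total : Int) (ip : Int × String) : Int :=
  let total := total + PySem.Dict.getD (PySem.Dict.mk production_times) ip.2 0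
  if ip.1 < (full.length : Int) - 1 then
    match PySem.List.pyGet? full (ip.1 + 1) with
    | some next => total + PySem.Dict.getD (PySem.Dict.mk (setup_times.map (fun q => ((q.1, q.2.1), q.2.2)))) (ip.2, next) 0
    | none => total   -- unreachable: the guard keeps idx+1 in range
  else total

def get_total_production_time (optimal_path : List String) (setup_times : List (String × String × Int)) (production_times : List (String × Int)) : Int :=
  (PySem.List.enumerate optimal_path).foldl (pvStepA optimal_path setup_times production_times) 0

-- ===== PORT B =====
-- the items of the Python dict a parameter denotes: under the assoc-list convention
-- (lookup = first match) these are the FIRST occurrence of each key, in order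
def pvItems {κ ν : Type} [BEq κ] : List (κ × ν) → List (κ × ν)
  | [] => []
  | kv :: rest => kv :: (pvItems rest).filter (fun q => !(q.1 == kv.1))

def get_total_production_time_alt (optimal_path : List String) (setup_times : List (String × String × Int)) (production_times : List (String × Int)) : Int :=
  let prod_counts := optimal_path.foldl (fun d p => d.insert p (d.getD p 0 + 1)) PySem.Dict.empty
  let trans_counts := (optimal_path.zip (optimal_path.drop 1)).foldl
    (fun d pair => d.insert pair (d.getD pair 0 + 1)) PySem.Dict.empty
  let total := (pvItems production_times).foldl
    (fun tot kv => tot + kv.2 * prod_counts.getD kv.1 0) 0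
  (pvItems (setup_times.map (fun q => ((q.1, q.2.1), q.2.2)))).foldl
    (fun tot kv => tot + kv.2 * trans_counts.getD kv.1 0) total

-- ===== PRECONDITION & SPEC =====
def Spec_get_total_production_time (optimal_path : List String) (setup_times : List (String × String × Int)) (production_times : List (String × Int)) (out : Int) : Prop := out = get_total_production_time_alt optimal_path setup_times production_times
instance (optimal_path : List String) (setup_times : List (String × String × Int)) (production_times : List (String × Int)) (out : Int) : Decidable (Spec_get_total_production_time optimal_path setup_times production_times out) := by unfold Spec_get_total_production_time; infer_instance

-- ===== CLAIM (what is proved, stated in full; the proofs are below) =====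
def Claim_equal_get_total_production_time : Prop := ∀ (optimal_path : List String) (setup_times : List (String × String × Int)) (production_times : List (String × Int)), Dom_get_total_production_time optimal_path setup_times production_times → Spec_get_total_production_time optimal_path setup_times production_times (get_total_production_time optimal_path setup_times production_times)

-- ===== LEMMAS AND PROOFS =====

-- A's fold over the enumerated suffix `rest` of the full path `pre ++ rest` adds acc,
-- the production sum over rest, and the changeover sum over adjacent pairs of rest.
theorem pvKey (setup_times : List (String × String × Int)) (production_times : List (String × Int)) :
    ∀ (rest pre : List String) (acc : Int),
      (PySem.List.enumerate rest (pre.length : Int)).foldl (pvStepA (pre ++ rest) setup_times production_times) acc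
      = acc + (rest.map (fun p => PySem.Dict.getD (PySem.Dict.mk production_times) p 0)).sum
          + ((rest.zip (rest.drop 1)).map (fun t => PySem.Dict.getD (PySem.Dict.mk (setup_times.map (fun q => ((q.1, q.2.1), q.2.2)))) t 0)).sum := by
  intro rest
  induction rest with
  | nil => intro pre acc; simp [PySem.List.enumerate]
  | cons x rest' ih =>
    intro pre acc
    rw [PySem.List.enumerate_cons, List.foldl_cons]
    have hlist : pre ++ x :: rest' = (pre ++ [x]) ++ rest' := by simp
    have hlen : ((pre.length : Int) + 1) = (((pre ++ [x]).length : Int)) := by simp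
    rw [hlist, hlen, ih (pre ++ [x])]
    cases rest' with
    | nil =>
      have hcond : ¬ ((pre.length : Int) < (((pre ++ [x]) ++ ([] : List String)).length : Int) - 1) := by simp
      simp only [pvStepA, if_neg hcond]
      simp
    | cons y rest'' =>
      have hcond : (pre.length : Int) < (((pre ++ [x]) ++ (y :: rest'')).length : Int) - 1 := by
        simp; omega
      have hget : PySem.List.pyGet? ((pre ++ [x]) ++ (y :: rest'')) ((pre.length : Int) + 1) = some y := by
        rw [hlen]; exact PySem.List.pyGet?_append_length _ _ _
      simp only [pvStepA, if_pos hcond, hget]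
      simp only [List.drop, List.zip_cons_cons, List.map_cons, List.sum_cons]
      ring

-- first-match lookup ignores entries whose key is filtered away for a DIFFERENT key
theorem pvGetDFilter {κ ν : Type} [BEq κ] [LawfulBEq κ] (m : List (κ × ν)) (k x : κ) (hx : x ≠ k) (d0 : ν) :
    PySem.Dict.getD (PySem.Dict.mk (m.filter (fun q => !(q.1 == k)))) x d0
    = PySem.Dict.getD (PySem.Dict.mk m) x d0 := by
  induction m with
  | nil => rfl
  | cons kv rest ih =>
    by_cases hk : kv.1 = k
    · have : (!(kv.1 == k)) = false := by simp [hk]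
      rw [List.filter_cons, this, if_neg Bool.false_ne_true]
      rw [ih]
      have hne : (kv.1 == x) = false := by simp [hk]; exact fun h => hx h.symm
      rw [PySem.Dict.getD_eq_get?_getD, PySem.Dict.getD_eq_get?_getD]
      rw [show PySem.Dict.mk (kv :: rest) = ({ items := (kv.1, kv.2) :: rest } : PySem.Dict κ ν) from by rfl]
      rw [PySem.Dict.get?_mk_cons, hne]
      rfl
    · have : (!(kv.1 == k)) = true := by simp [hk]
      rw [List.filter_cons, this, if_pos rfl]
      rw [PySem.Dict.getD_eq_get?_getD, PySem.Dict.getD_eq_get?_getD]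
      rw [show PySem.Dict.mk (kv :: rest.filter (fun q => !(q.1 == k))) = ({ items := (kv.1, kv.2) :: rest.filter (fun q => !(q.1 == k)) } : PySem.Dict κ ν) from by rfl]
      rw [show PySem.Dict.mk (kv :: rest) = ({ items := (kv.1, kv.2) :: rest } : PySem.Dict κ ν) from by rfl]
      rw [PySem.Dict.get?_mk_cons, PySem.Dict.get?_mk_cons]
      by_cases h1 : kv.1 == x
      · rw [if_pos h1, if_pos h1]
      · rw [if_neg (by simp_all), if_neg (by simp_all)]
        rw [PySem.Dict.getD_eq_get?_getD, PySem.Dict.getD_eq_get?_getD] at ih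
        exact ih

-- dropping later duplicate keys does not change first-match lookup
theorem pvGetDItems {κ ν : Type} [BEq κ] [LawfulBEq κ] (l : List (κ × ν)) (x : κ) (d0 : ν) :
    PySem.Dict.getD (PySem.Dict.mk (pvItems l)) x d0 = PySem.Dict.getD (PySem.Dict.mk l) x d0 := by
  induction l with
  | nil => rfl
  | cons kv rest ih =>
    simp only [pvItems]
    rw [PySem.Dict.getD_eq_get?_getD, PySem.Dict.getD_eq_get?_getD]
    rw [show PySem.Dict.mk (kv :: (pvItems rest).filter (fun q => !(q.1 == kv.1))) = ({ items := (kv.1, kv.2) :: (pvItems rest).filter (fun q => !(q.1 == kv.1)) } : PySem.Dict κ ν) from by rfl]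
    rw [show PySem.Dict.mk (kv :: rest) = ({ items := (kv.1, kv.2) :: rest } : PySem.Dict κ ν) from by rfl]
    rw [PySem.Dict.get?_mk_cons, PySem.Dict.get?_mk_cons]
    by_cases h1 : kv.1 == x
    · rw [if_pos h1, if_pos h1]
    · rw [if_neg h1, if_neg h1]
      have hx : x ≠ kv.1 := by simp at h1; exact fun h => h1 h.symm
      have := pvGetDFilter (pvItems rest) kv.1 x hx d0
      rw [PySem.Dict.getD_eq_get?_getD, PySem.Dict.getD_eq_get?_getD] at this
      rw [this]
      rw [PySem.Dict.getD_eq_get?_getD, PySem.Dict.getD_eq_get?_getD] at ih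
      exact ih

-- pvItems has pairwise-distinct keys
theorem pvItemsNodup {κ ν : Type} [BEq κ] [LawfulBEq κ] (l : List (κ × ν)) :
    ((pvItems l).map Prod.fst).Nodup := by
  induction l with
  | nil => simp [pvItems]
  | cons kv rest ih =>
    simp only [pvItems, List.map_cons, List.nodup_cons]
    constructor
    · intro hmem
      obtain ⟨q, hq, hq1⟩ := List.mem_map.mp hmem
      have := List.of_mem_filter hq
      simp [hq1] at this
    · exact List.Nodup.sublist (List.filter_sublist.map Prod.fst) ih

-- on a nodup-key assoc list, summing (if key == x then v else 0) is the first-match lookup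
theorem pvSumIte {κ : Type} [BEq κ] [LawfulBEq κ] (d : List (κ × Int)) (hnd : (d.map Prod.fst).Nodup) (x : κ) :
    (d.map (fun kv => if kv.1 == x then kv.2 else (0 : Int))).sum
    = PySem.Dict.getD (PySem.Dict.mk d) x 0 := by
  induction d with
  | nil => rfl
  | cons kv rest ih =>
    simp only [List.map_cons, List.nodup_cons] at hnd
    simp only [List.map_cons, List.sum_cons]
    rw [PySem.Dict.getD_eq_get?_getD]
    rw [show PySem.Dict.mk (kv :: rest) = ({ items := (kv.1, kv.2) :: rest } : PySem.Dict κ Int) from by rfl]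
    rw [PySem.Dict.get?_mk_cons]
    by_cases h1 : kv.1 == x
    · rw [if_pos h1, if_pos h1]
      have hx : x = kv.1 := by simp at h1; exact h1.symm
      have hz : (rest.map (fun kv => if kv.1 == x then kv.2 else (0 : Int))).sum = 0 := by
        rw [List.sum_eq_zero]
        intro y hy
        obtain ⟨q, hq, rfl⟩ := List.mem_map.mp hy
        have : ¬ (q.1 == x) = true := by
          intro h
          exact hnd.1 (hx ▸ (by simp at h; exact h ▸ List.mem_map_of_mem hq))
        rw [if_neg this]
      rw [hz]; simp
    · rw [if_neg h1, if_neg h1]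
      rw [ih hnd.2, PySem.Dict.getD_eq_get?_getD]
      simp
  
-- MAIN: sum of lookups along xs = sum over nodup-key entries of value × multiplicity
theorem pvMain {κ : Type} [BEq κ] [LawfulBEq κ] (d : List (κ × Int)) (hnd : (d.map Prod.fst).Nodup) :
    ∀ (xs : List κ),
      (xs.map (fun x => PySem.Dict.getD (PySem.Dict.mk d) x 0)).sum
      = (d.map (fun kv => kv.2 * (PySem.List.count xs kv.1 : Int))).sum := by
  intro xs
  induction xs with
  | nil => simp [PySem.List.count]
  | cons x xs ih =>
    simp only [List.map_cons, List.sum_cons]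
    have hsplit : (d.map (fun kv => kv.2 * (PySem.List.count (x :: xs) kv.1 : Int))).sum
        = (d.map (fun kv => (if kv.1 == x then kv.2 else 0) + kv.2 * (PySem.List.count xs kv.1 : Int))).sum := by
      apply congrArg
      apply List.map_congr_left
      intro kv _
      simp only [PySem.List.count, List.count_cons]
      push_cast
      by_cases h : kv.1 == x
      · have hx : (x == kv.1) = true := by simp_all
        rw [if_pos h, hx]
        simp only [if_pos trivial]
        ring
      · have hx : (x == kv.1) = false := by simp_all; exact fun h' => h h'.symm
        rw [if_neg h, hx]
        simp
    rw [hsplit, PySem.List.sum_map_add_int, pvSumIte d hnd x, ih]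

theorem get_total_production_time_spec' (optimal_path : List String) (setup_times : List (String × String × Int)) (production_times : List (String × Int)) :
    get_total_production_time optimal_path setup_times production_times
    = get_total_production_time_alt optimal_path setup_times production_times := by
  unfold get_total_production_time get_total_production_time_alt
  have h := pvKey setup_times production_times optimal_path [] 0
  simp only [List.length_nil, Int.natCast_zero, List.nil_append] at h
  rw [h]
  simp only [PySem.List.foldl_add, PySem.Dict.getD_foldl_insert_add_one, PySem.Dict.getD_empty]
  simp only [zero_add]
  have e1 : ∀ (l : List (String × Int)) (xs : List String),
      (xs.map (fun p => PySem.Dict.getD (PySem.Dict.mk l) p 0)).sum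
      = ((pvItems l).map (fun kv => kv.2 * (List.count kv.1 xs : Int))).sum := by
    intro l xs
    calc (xs.map (fun p => PySem.Dict.getD (PySem.Dict.mk l) p 0)).sum
        = (xs.map (fun p => PySem.Dict.getD (PySem.Dict.mk (pvItems l)) p 0)).sum := by
          apply congrArg; apply List.map_congr_left; intro p _; rw [pvGetDItems]
      _ = _ := by simpa [PySem.List.count] using pvMain (pvItems l) (pvItemsNodup l) xs
  have e2 : ∀ (l : List ((String × String) × Int)) (xs : List (String × String)),
      (xs.map (fun p => PySem.Dict.getD (PySem.Dict.mk l) p 0)).sum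
      = ((pvItems l).map (fun kv => kv.2 * (List.count kv.1 xs : Int))).sum := by
    intro l xs
    calc (xs.map (fun p => PySem.Dict.getD (PySem.Dict.mk l) p 0)).sum
        = (xs.map (fun p => PySem.Dict.getD (PySem.Dict.mk (pvItems l)) p 0)).sum := by
          apply congrArg; apply List.map_congr_left; intro p _; rw [pvGetDItems]
      _ = _ := by simpa [PySem.List.count] using pvMain (pvItems l) (pvItemsNodup l) xs
  rw [e1, e2]

-- ===== VERDICT (by name: the statement is the Claim_ definition above) =====
theorem get_total_production_time_spec : Claim_equal_get_total_production_time := by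
  intro path st pt _
  unfold Spec_get_total_production_time
  exact get_total_production_time_spec' path st pt
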